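-- pv_equiv track=rewrite | github.com/iucario/WorkoutDetector | workoutdet/predict.py | pred_to_count
-- ===== SOURCE A (Python) =====
-- from typing import Callable, Dict, List, Optional, Tuple
--
-- def pred_to_count(preds: List[int], stride: int, step: int = 1) -> Tuple[int, List[int]]:
--     """Convert a list of predictions to a repetition count.
--
--     Args:
--         preds (List[int]): list of size total_frames//stride in the video. If -1, it means no action.
--         stride (int): predict every stride frames.
--         step (int): step size of the sampled frames. Does not effect the result.
--
--     Returns:
--         A tuple of (repetition count, list of preds of action start and end states,
--             e.g. start_1, end_1, start_2, end_2, ...)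
--
--     Note:
--         The labels are in order. Because that's how I loaded the data.
--         E.g. 0 and 1 represent the start and end of the same action.
--         We consider action class as well as state changes.
--         I can ensemble a standalone action recognition model if things don't work well.
--
--     Algorithm:
--         1. If the state changes, and current and previous state are of the same action,
--             and are in order, we count the action. For example, if the state changes from
--             0 to 1, or 2 to 3, aka even to odd, we count the action.
--
--         It means the model has to capture the presice time of state transition.
--         Because the model takes 8 continuous frames as input.
--         Or I doubt it would work well. Multiple time scale should be added.
--
--     Example:
--         >>> preds = [-1, -1, 6, 6, 6, 7, 6, 6, 6, 7, 6, 6, 7, 7, 6, 6, 7, 7, 6, 6, 7, 7, 6, 6, 7, 7, -1]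
--         >>> pred_to_count(preds, stride=8, step=2)
--         (6, [16, 40, 48, 72, 80, 96, 112, 128, 144, 160, 176, 192])
--     """
--
--     count = 0
--     reps = []  # start_1, end_1, start_2, end_2, ...
--     states: List[int] = []
--     prev_state_start_idx = 0
--     for idx, pred in enumerate(preds):
--         if pred == -1:
--             continue
--         # if state changes and current and previous state are the same action
--         if states and states[-1] != pred:
--             if pred % 2 == 1 and states[-1] == pred - 1:
--                 count += 1
--                 reps.append(prev_state_start_idx * stride)
--                 reps.append(idx * stride)
--         states.append(pred)
--         prev_state = preds[prev_state_start_idx]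
--         if pred != prev_state:  # new state, new start index
--             prev_state_start_idx = idx
--
--     assert count * 2 == len(reps)
--     return count, reps  # len(rep) * step <= len(frames), last not full queue is discarded
-- ===== SOURCE B (Python) =====
-- from typing import List, Tuple
--
-- def pred_to_count(preds: List[int], stride: int, step: int = 1) -> Tuple[int, List[int]]:
--     """Compress preds to runs (value, start index), skipping -1 and merging equal
--     values separated only by -1; then count adjacent even->odd transitions."""
--     runs: List[Tuple[int, int]] = []
--     for i, p in enumerate(preds):
--         if p == -1:
--             continue
--         if not runs or runs[-1][0] != p:
--             runs.append((p, i))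
--     count = 0
--     reps: List[int] = []
--     for (v, vi), (q, qi) in zip(runs, runs[1:]):
--         if q % 2 == 1 and v == q - 1:
--             count += 1
--             reps.append(vi * stride)
--             reps.append(qi * stride)
--     return count, reps
-- ===== Notes on version B (the rewrite author's own statement) =====
-- stated objective: alternative
-- what changed: A's single elementwise pass carrying a growing states list, a prev-start index and a re-lookup preds[prev_state_start_idx] is replaced by a two-phase decomposition: first compress preds into a run-length list of (value, start_index) pairs (dropping -1 and merging equal values across -1 gaps), then scan adjacent run pairs for even->odd transitions.
import Mathlib
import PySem

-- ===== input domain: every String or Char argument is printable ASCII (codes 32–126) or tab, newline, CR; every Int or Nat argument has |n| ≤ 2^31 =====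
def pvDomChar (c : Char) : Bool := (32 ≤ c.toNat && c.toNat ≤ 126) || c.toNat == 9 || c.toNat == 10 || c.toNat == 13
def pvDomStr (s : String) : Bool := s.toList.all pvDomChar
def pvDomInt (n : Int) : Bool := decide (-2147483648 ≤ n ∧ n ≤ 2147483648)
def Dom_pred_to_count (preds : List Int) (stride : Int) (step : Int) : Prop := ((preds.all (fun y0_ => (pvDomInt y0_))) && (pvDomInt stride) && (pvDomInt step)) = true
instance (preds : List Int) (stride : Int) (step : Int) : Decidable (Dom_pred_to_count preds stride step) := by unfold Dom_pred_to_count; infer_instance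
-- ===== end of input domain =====

-- B replaces A's single stateful pass by a compress-to-runs phase followed by an
-- adjacent-run scan (alternative decomposition, same cost).


-- ===== PORT A =====
-- the `for idx, pred in enumerate(preds)` loop, carrying (count, reps, states, prev_state_start_idx)
def aLoop (preds : List Int) (stride : Int) :
    List Int → Nat → Int → List Int → List Int → Nat → Int × List Int
  | [], _, count, reps, _, _ => (count, reps)
  | p :: rest, idx, count, reps, states, pidx =>
    if p = -1 then aLoop preds stride rest (idx + 1) count reps states pidx
    else
      let cr :=
        match states.getLast? with
        | some s =>        -- `if states and states[-1] != pred: if pred % 2 == 1 and states[-1] == pred - 1:`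
          if s ≠ p ∧ (PySem.Int.mod p 2 = 1 ∧ s = p - 1) then
            (count + 1, reps ++ [(pidx : Int) * stride, (idx : Int) * stride])
          else (count, reps)
        | none => (count, reps)
      let states' := states ++ [p]
      -- prev_state = preds[prev_state_start_idx]; pidx is always a valid index here, so no IndexError
      let prev := (PySem.List.pyGet? preds (pidx : Int)).getD 0
      aLoop preds stride rest (idx + 1) cr.1 cr.2 states' (if p ≠ prev then idx else pidx)

def pred_to_count (preds : List Int) (stride : Int) (step : Int) : Int × List Int :=
  aLoop preds stride preds 0 0 [] [] 0

-- ===== PORT B =====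
-- phase 1: run-length compression (value, start index), dropping -1 and merging equal values
def bRuns : List Int → Nat → List (Int × Int) → List (Int × Int)
  | [], _, runs => runs
  | p :: rest, idx, runs =>
    if p = -1 then bRuns rest (idx + 1) runs
    else
      match runs.getLast? with
      | some vv => if vv.1 = p then bRuns rest (idx + 1) runs
                   else bRuns rest (idx + 1) (runs ++ [(p, (idx : Int))])
      | none => bRuns rest (idx + 1) (runs ++ [(p, (idx : Int))])

-- phase 2: one step of the `for (v, vi), (q, qi) in zip(runs, runs[1:])` loop
def bScanStep (stride : Int) (cr : Int × List Int) (pr : (Int × Int) × (Int × Int)) : Int × List Int :=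
  if PySem.Int.mod pr.2.1 2 = 1 ∧ pr.1.1 = pr.2.1 - 1 then
    (cr.1 + 1, cr.2 ++ [pr.1.2 * stride, pr.2.2 * stride])
  else cr

def pred_to_count_alt (preds : List Int) (stride : Int) (step : Int) : Int × List Int :=
  let runs := bRuns preds 0 []
  (runs.zip runs.tail).foldl (bScanStep stride) (0, [])

-- ===== PRECONDITION & SPEC =====
def Spec_pred_to_count (preds : List Int) (stride : Int) (step : Int) (out : Int × List Int) : Prop := out = pred_to_count_alt preds stride step
instance (preds : List Int) (stride : Int) (step : Int) (out : Int × List Int) : Decidable (Spec_pred_to_count preds stride step out) := by unfold Spec_pred_to_count; infer_instance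

-- ===== CLAIM (what is proved, stated in full; the proofs are below) =====
def Claim_equal_pred_to_count : Prop := ∀ (preds : List Int) (stride : Int) (step : Int), Dom_pred_to_count preds stride step → Spec_pred_to_count preds stride step (pred_to_count preds stride step)

-- ===== LEMMAS AND PROOFS =====

-- the adjacent-pairs list of runs ++ [r] extends that of runs by (last runs, r)
lemma zip_tail_concat {α : Type} : ∀ (rs : List α) (x y : α), rs.getLast? = some x →
    (rs ++ [y]).zip (rs ++ [y]).tail = rs.zip rs.tail ++ [(x, y)] := by
  intro rs
  induction rs with
  | nil => intro x y h; simp at h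
  | cons a t ih =>
    intro x y h
    cases t with
    | nil => simp_all
    | cons b t' =>
      have h' : (b :: t').getLast? = some x := by
        simpa [List.getLast?_cons_cons] using h
      have := ih x y h'
      simp only [List.cons_append, List.zip_cons_cons, List.tail_cons] at *
      simp [this]

-- one new run appended: the scan result gains exactly one bScanStep
lemma scan_concat (stride : Int) (rs : List (Int × Int)) (x r : Int × Int)
    (h : rs.getLast? = some x) :
    ((rs ++ [r]).zip (rs ++ [r]).tail).foldl (bScanStep stride) (0, []) =
      bScanStep stride ((rs.zip rs.tail).foldl (bScanStep stride) (0, [])) (x, r) := by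
  rw [zip_tail_concat rs x r h, List.foldl_append]
  simp

-- main invariant-carrying induction over the remaining suffix
lemma main_loop (preds : List Int) (stride : Int) :
    ∀ (rest : List Int) (idx : Nat) (count : Int) (reps states : List Int)
      (pidx : Nat) (runs : List (Int × Int)),
    preds.drop idx = rest →
    (count, reps) = (runs.zip runs.tail).foldl (bScanStep stride) (0, []) →
    (∀ v vi, runs.getLast? = some (v, vi) →
        states.getLast? = some v ∧ (pidx : Int) = vi ∧
        PySem.List.pyGet? preds (pidx : Int) = some v) →
    (runs = [] → states = [] ∧ pidx = 0 ∧
        (idx = 0 ∨ PySem.List.pyGet? preds 0 = some (-1))) →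
    aLoop preds stride rest idx count reps states pidx =
      ((bRuns rest idx runs).zip (bRuns rest idx runs).tail).foldl (bScanStep stride) (0, []) := by
  intro rest
  induction rest with
  | nil => intro idx count reps states pidx runs _ hcr _ _; simpa [aLoop, bRuns] using hcr
  | cons p rest' ih =>
    intro idx count reps states pidx runs hdrop hcr hsome hnone
    have hdrop' : preds.drop (idx + 1) = rest' := by
      rw [← List.tail_drop, hdrop]; rfl
    have hgetp : PySem.List.pyGet? preds (idx : Int) = some p := by
      rw [PySem.List.pyGet?_natCast, ← List.head?_drop, hdrop]; rfl
    by_cases hp : p = -1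
    · simp only [aLoop, bRuns, if_pos hp]
      refine ih (idx + 1) count reps states pidx runs hdrop' hcr hsome ?_
      intro hr
      obtain ⟨hs, hpi, hor⟩ := hnone hr
      refine ⟨hs, hpi, Or.inr ?_⟩
      rcases hor with h0 | hP
      · subst h0; rw [hp] at hgetp; simpa using hgetp
      · exact hP
    · simp only [aLoop, bRuns, if_neg hp]
      cases hrl : runs.getLast? with
      | none =>
        have hre : runs = [] := List.getLast?_eq_none_iff.mp hrl
        obtain ⟨hs, hpi, hor⟩ := hnone hre
        subst hs hre
        simp only [List.getLast?_nil]
        by_cases hid : idx = 0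
        · subst hid
          have hprev : (PySem.List.pyGet? preds ((pidx : Nat) : Int)).getD 0 = p := by
            rw [hpi]
            exact congrArg (Option.getD · 0) hgetp
          rw [hprev, if_neg (not_not_intro rfl)]
          refine ih _ _ _ _ _ _ hdrop' (by simpa using hcr) ?_ (by simp)
          intro v vi h
          simp only [List.nil_append, List.getLast?_singleton, Option.some.injEq,
            Prod.mk.injEq] at h
          refine ⟨by simp [h.1], by rw [hpi, ← h.2], ?_⟩
          rw [hpi, ← h.1]; exact hgetp
        · have hP : PySem.List.pyGet? preds 0 = some (-1) := by
            rcases hor with h0 | hP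
            · exact absurd h0 hid
            · exact hP
          have hprev : (PySem.List.pyGet? preds ((pidx : Nat) : Int)).getD 0 = -1 := by
            rw [hpi]; exact congrArg (Option.getD · 0) hP
          rw [hprev, if_pos hp]
          refine ih _ _ _ _ _ _ hdrop' (by simpa using hcr) ?_ (by simp)
          intro v vi h
          simp only [List.nil_append, List.getLast?_singleton, Option.some.injEq,
            Prod.mk.injEq] at h
          exact ⟨by simp [h.1], h.2, h.1 ▸ hgetp⟩
      | some vv =>
        obtain ⟨v, vi⟩ := vv
        obtain ⟨hst, hpx, hpg⟩ := hsome v vi hrl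
        have hne : runs ≠ [] := by rintro rfl; simp at hrl
        have hprev : (PySem.List.pyGet? preds ((pidx : Nat) : Int)).getD 0 = v := by
          rw [hpg]; rfl
        rw [hst, hprev]
        simp only []
        by_cases hvp : v = p
        · subst hvp
          rw [if_pos rfl, if_neg (by simp), if_neg (not_not_intro rfl)]
          refine ih _ _ _ _ _ _ hdrop' hcr ?_ (fun h => absurd h hne)
          intro v' vi' h
          rw [hrl] at h
          simp only [Option.some.injEq, Prod.mk.injEq] at h
          exact ⟨by rw [List.getLast?_concat, h.1], h.2 ▸ hpx, h.1 ▸ hpg⟩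
        · rw [if_neg hvp, if_pos (fun h : p = v => hvp h.symm)]
          refine ih _ _ _ _ _ _ hdrop' ?_ ?_ (by simp)
          · rw [scan_concat stride runs (v, vi) (p, (idx : Int)) hrl, ← hcr]
            unfold bScanStep
            by_cases hc : PySem.Int.mod p 2 = 1 ∧ v = p - 1
            · rw [if_pos hc, if_pos ⟨hvp, hc⟩, hpx]
            · rw [if_neg hc, if_neg (fun h => hc h.2)]
          · intro v' vi' h
            rw [List.getLast?_concat] at h
            simp only [Option.some.injEq, Prod.mk.injEq] at h
            exact ⟨by rw [List.getLast?_concat, h.1], h.2, h.1 ▸ hgetp⟩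

-- ===== VERDICT (by name: the statement is the Claim_ definition above) =====
theorem pred_to_count_spec : Claim_equal_pred_to_count := by
  intro preds stride step _
  unfold Spec_pred_to_count pred_to_count pred_to_count_alt
  exact main_loop preds stride preds 0 0 [] [] 0 [] rfl rfl (by simp) (by simp)
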